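-- pv_equiv track=rewrite | github.com/Nontrust/coding-test | .idea/inflearn/2_hash/2. 빈도수(ver 2).py | solution
-- ===== SOURCE A (Python) =====
-- from collections import defaultdict, Counter
--
-- def solution(nums):
--     answer = -1
--     # value decline int (set default value 0)
--     nums_dict = defaultdict(int)
--     for num in nums:
--         nums_dict[num] += 1
--
--     for num in nums_dict:
--         if nums_dict[num] == 1:
--             answer = max(num, answer)
--
--     return answer
-- ===== SOURCE B (Python) =====
-- def solution(nums):
--     # Sort a copy and scan maximal runs of equal values; a run of length 1 is a
--     # candidate for the answer (initialised to -1, like A's max(num, -1)).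
--     answer = -1
--     s = sorted(nums)
--     if not s:
--         return answer
--     run_val = s[0]
--     run_len = 1
--     for x in s[1:]:
--         if x == run_val:
--             run_len += 1
--         else:
--             if run_len == 1:
--                 answer = max(answer, run_val)
--             run_val = x
--             run_len = 1
--     if run_len == 1:
--         answer = max(answer, run_val)
--     return answer
-- ===== Notes on version B (the rewrite author's own statement) =====
-- stated objective: alternative
-- what changed: Replaces the frequency-dictionary pass plus key scan with sort-a-copy and a single run-length scan over the sorted list, flushing each length-1 run into a running maximum.
import Mathlib
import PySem

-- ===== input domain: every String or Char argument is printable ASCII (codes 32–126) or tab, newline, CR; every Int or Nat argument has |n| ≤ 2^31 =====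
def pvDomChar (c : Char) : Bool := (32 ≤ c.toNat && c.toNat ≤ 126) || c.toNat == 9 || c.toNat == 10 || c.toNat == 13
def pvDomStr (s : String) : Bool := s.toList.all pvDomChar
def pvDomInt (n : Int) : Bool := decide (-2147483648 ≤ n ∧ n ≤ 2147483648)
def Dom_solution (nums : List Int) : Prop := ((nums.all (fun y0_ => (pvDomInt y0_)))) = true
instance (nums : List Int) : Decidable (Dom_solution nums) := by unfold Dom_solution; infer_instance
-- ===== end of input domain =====

-- B replaces A's frequency-dictionary pass with sort-a-copy plus a single run-length scan (alternative algorithm, same values; not faster).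


-- ===== PORT A =====
-- builds the frequency dict (defaultdict(int); d[num] += 1), then scans its keys
def solution (nums : List Int) : Int :=
  let d := nums.foldl (fun d num => d.modify num 0 (· + 1)) (PySem.Dict.empty : PySem.Dict Int Int)
  d.keys.foldl (fun answer num => if d.getD num 0 = 1 then max num answer else answer) (-1)

-- ===== PORT B =====
-- the 'for x in s[1:]' loop of Source B with state (answer, run_val, run_len);
-- the [] case is Source B's trailing 'if run_len == 1' flush
def runLoop : List Int → Int → Int → Int → Int
  | [], ans, rv, rl => if rl = 1 then max ans rv else ans
  | x :: rest, ans, rv, rl =>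
    if x = rv then runLoop rest ans rv (rl + 1)
    else runLoop rest (if rl = 1 then max ans rv else ans) x 1

def solution_alt (nums : List Int) : Int :=
  match PySem.List.sorted nums (fun x => x) false with
  | [] => -1
  | x :: rest => runLoop rest (-1) x 1

-- ===== PRECONDITION & SPEC =====
def Spec_solution (nums : List Int) (out : Int) : Prop := out = solution_alt nums
instance (nums : List Int) (out : Int) : Decidable (Spec_solution nums out) := by unfold Spec_solution; infer_instance

-- ===== CLAIM (what is proved, stated in full; the proofs are below) =====
def Claim_equal_solution : Prop := ∀ (nums : List Int), Dom_solution nums → Spec_solution nums (solution nums)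

-- ===== LEMMAS AND PROOFS =====

-- the values occurring exactly once in s, in s's order
def singles (s : List Int) : List Int := s.filter (fun v => List.count v s == 1)

lemma runLoop_eq (rest : List Int) : ∀ (ans rv rl : Int),
    (rv :: rest).Pairwise (· ≤ ·) → 1 ≤ rl →
    runLoop rest ans rv rl =
      List.foldl max (if rl + (List.count rv rest : Int) = 1 then max ans rv else ans)
        (rest.filter (fun v => List.count v rest == 1 && v != rv)) := by
  induction rest with
  | nil => intro ans rv rl hs hrl; simp [runLoop]
  | cons x t ih =>
    intro ans rv rl hs hrl
    by_cases hx : x = rv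
    · subst hx
      have h2 : runLoop (x :: t) ans x rl = runLoop t ans x (rl + 1) := by simp [runLoop]
      rw [h2, ih ans x (rl + 1) hs.of_cons (by omega)]
      have c1 : (rl + 1 + (List.count x t : Int) = 1) = False := by
        simp only [eq_iff_iff, iff_false]; omega
      have c2 : (rl + (List.count x (x :: t) : Int) = 1) = False := by
        simp only [List.count_cons_self, eq_iff_iff, iff_false]; push_cast; omega
      simp only [c1, c2, if_false]
      congr 1
      rw [List.filter_cons]
      simp only [bne_self_eq_false, Bool.and_false]
      apply List.filter_congr
      intro v hv
      by_cases hvx : v = x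
      · simp [hvx]
      · have h1 : (x = v) = False := by simp [Ne.symm hvx]
        simp [h1]
    · have h2 : runLoop (x :: t) ans rv rl
          = runLoop t (if rl = 1 then max ans rv else ans) x 1 := by simp [runLoop, hx]
      have hxt : (x :: t).Pairwise (· ≤ ·) := hs.of_cons
      have hrvx : rv ≤ x := (List.pairwise_cons.mp hs).1 x (List.mem_cons_self ..)
      have hrvlt : rv < x := lt_of_le_of_ne hrvx (fun h => hx h.symm)
      have hnot : rv ∉ x :: t := by
        intro hm
        rcases List.mem_cons.mp hm with h | h
        · exact hx h.symm
        · exact absurd ((List.pairwise_cons.mp hxt).1 rv h) (not_le.mpr hrvlt)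
      have c0 : List.count rv (x :: t) = 0 := List.count_eq_zero.mpr hnot
      rw [h2, ih (if rl = 1 then max ans rv else ans) x 1 hxt le_rfl]
      have hfil : List.filter (fun v => List.count v (x :: t) == 1 && v != rv) (x :: t)
          = (if List.count x t = 0 then [x] else [])
            ++ List.filter (fun v => List.count v t == 1 && v != x) t := by
        rw [List.filter_cons]
        have hbx : (x != rv) = true := by simp [bne_iff_ne, hx]
        have hQx : (List.count x (x :: t) == 1 && x != rv) = decide (List.count x t = 0) := by
          rw [hbx, Bool.and_true, List.count_cons_self]
          by_cases h0 : List.count x t = 0 <;> simp [h0]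
        rw [hQx]
        have htl : List.filter (fun v => List.count v (x :: t) == 1 && v != rv) t
            = List.filter (fun v => List.count v t == 1 && v != x) t := by
          apply List.filter_congr
          intro v hv
          by_cases hvx : v = x
          · subst hvx
            have : 1 ≤ List.count v t := List.one_le_count_iff.mpr hv
            simp only [List.count_cons_self]
            have : (List.count v t + 1 == 1) = false := by
              simp only [beq_eq_false_iff_ne, ne_eq]; omega
            simp [this]
          · have hvrv : v ≠ rv := by
              intro h; subst h
              exact hnot (List.mem_cons_of_mem _ hv)
            have h1 : (x = v) = False := by simp [Ne.symm hvx]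
            have h2' : (v != rv) = true := by simp [bne_iff_ne, hvrv]
            have h3' : (v != x) = true := by simp [bne_iff_ne, hvx]
            simp [h1, h2', h3']
        rw [htl]
        by_cases h0 : List.count x t = 0 <;> simp [h0]
      rw [hfil, c0]
      simp only [Nat.cast_zero, add_zero]
      by_cases h0 : List.count x t = 0
      · simp [h0]
      · have : (1 + (List.count x t : Int) = 1) = False := by
          simp only [eq_iff_iff, iff_false]; omega
        simp [h0, this]

lemma alt_eq_singles (nums : List Int) :
    solution_alt nums
      = List.foldl max (-1) (singles (PySem.List.sorted nums (fun x => x) false)) := by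
  unfold solution_alt
  have hp := PySem.List.sorted_pairwise nums (fun x => x)
  cases hs : PySem.List.sorted nums (fun x => x) false with
  | nil => simp [singles]
  | cons x rest =>
    rw [hs] at hp
    show runLoop rest (-1) x 1 = List.foldl max (-1) (singles (x :: rest))
    rw [runLoop_eq rest (-1) x 1 hp le_rfl]
    unfold singles
    rw [List.filter_cons]
    have hQx : (List.count x (x :: rest) == 1) = decide (List.count x rest = 0) := by
      rw [List.count_cons_self]
      by_cases h0 : List.count x rest = 0 <;> simp [h0]
    rw [hQx]
    have htl : List.filter (fun v => List.count v (x :: rest) == 1) rest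
        = List.filter (fun v => List.count v rest == 1 && v != x) rest := by
      apply List.filter_congr
      intro v hv
      by_cases hvx : v = x
      · subst hvx
        have h1 : 1 ≤ List.count v rest := List.one_le_count_iff.mpr hv
        have h3 : ¬ List.count v rest = 0 := by omega
        simp [h3]
      · have h1 : (x = v) = False := by simp [Ne.symm hvx]
        have h3' : (v != x) = true := by simp [bne_iff_ne, hvx]
        simp [h1, h3']
    rw [htl]
    by_cases h0 : List.count x rest = 0
    · simp [h0]
    · have : (1 + (List.count x rest : Int) = 1) = False := by
        simp only [eq_iff_iff, iff_false]; omega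
      simp [h0, this]

lemma a_eq_fold (nums : List Int) :
    solution nums
      = List.foldl (fun a k => if (List.count k nums : Int) = 1 then max k a else a) (-1)
          (PySem.Set.ofList nums) := by
  have hz : solution nums = (PySem.Dict.counter nums).keys.foldl (fun answer num =>
      if (PySem.Dict.counter nums).getD num 0 = 1 then max num answer else answer) (-1) := by
    simp only [solution, PySem.Dict.counter_eq_foldl]
    rfl
  rw [hz]
  simp only [PySem.Dict.keys_counter, PySem.Dict.getD_counter]

lemma main_eq (nums : List Int) : solution nums = solution_alt nums := by
  rw [a_eq_fold, alt_eq_singles]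
  rw [PySem.List.foldl_ite_eq_foldl_filter
        (p := fun k => (List.count k nums : Int) = 1) (f := fun a k => max k a)]
  rw [PySem.List.foldl_congr_mem _ _ max _ (fun acc x _ => max_comm x acc)]
  have hperm : (List.filter (fun k => decide ((List.count k nums : Int) = 1))
        (PySem.Set.ofList nums)).Perm
      (singles (PySem.List.sorted nums (fun x => x) false)) := by
    set s := PySem.List.sorted nums (fun x => x) false with hsdef
    have hsp : s.Perm nums := PySem.List.sorted_perm nums (fun x => x) false
    have hnd1 : (List.filter (fun k => decide ((List.count k nums : Int) = 1))
        (PySem.Set.ofList nums)).Nodup := (PySem.Set.nodup_ofList nums).filter _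
    have hnd2 : (singles s).Nodup := by
      rw [List.nodup_iff_count_le_one]
      intro a
      by_cases hm : a ∈ singles s
      · have hcs : List.count a s = 1 := by
          have := (List.mem_filter.mp hm).2
          simpa using this
        calc List.count a (singles s) ≤ List.count a s :=
              List.Sublist.count_le a (List.filter_sublist (l := s))
          _ ≤ 1 := le_of_eq hcs
      · rw [List.count_eq_zero.mpr hm]; omega
    refine (List.perm_ext_iff_of_nodup hnd1 hnd2).mpr ?_
    intro a
    simp only [singles, List.mem_filter, PySem.Set.mem_ofList]
    constructor
    · rintro ⟨hmem, hc⟩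
      have hc' : List.count a nums = 1 := by simpa using hc
      refine ⟨hsp.mem_iff.mpr hmem, ?_⟩
      simp [hsp.count_eq a, hc']
    · rintro ⟨hmem, hc⟩
      have hc' : List.count a s = 1 := by simpa using hc
      rw [hsp.count_eq a] at hc'
      exact ⟨hsp.mem_iff.mp hmem, by simp [hc']⟩
  rw [hperm.foldl_eq (-1)]

-- ===== VERDICT (by name: the statement is the Claim_ definition above) =====
theorem solution_spec : Claim_equal_solution := by
  intro nums _
  unfold Spec_solution
  exact main_eq nums
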